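-- pv_equiv track=rewrite | github.com/mohamedfouadhanani/information-retrieval | similarity/boolean.py | check
-- ===== SOURCE A (Python) =====
-- def check(parsed_query):
--     stack = []
--
--     for token in parsed_query:
--         try:
--             if token == "not":
--                 tos = stack.pop()
--                 result = f"not{tos}"
--                 stack.append(result)
--                 continue
--
--             if token == "and":
--                 tos_1 = stack.pop()
--                 tos_2 = stack.pop()
--                 result = f"{tos_1}and{tos_2}"
--                 stack.append(result)
--                 continue
--
--             if token == "or":
--                 tos_1 = stack.pop()
--                 tos_2 = stack.pop()
--                 result = f"{tos_1}ors{tos_2}"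
--                 stack.append(result)
--                 continue
--
--             stack.append(token)
--         except:
--             return False
--
--     stack_length = len(stack)
--
--     if stack_length == 1:
--         return True
--
--     return False
-- ===== SOURCE B (Python) =====
-- def check(parsed_query):
--     # Recursive-descent parse of the token list as a postfix expression tree,
--     # read from the right: one complete expression must consume every token.
--     def parse(rest):
--         # rest: remaining tokens in reversed order; returns leftover tokens
--         # after consuming one complete expression, or None on failure.
--         while True:
--             if not rest:
--                 return None
--             token, rest = rest[0], rest[1:]
--             if token == "not":
--                 continue  # tail call: parse the single operand
--             if token == "and" or token == "or":
--                 rest = parse(rest)  # first operand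
--                 if rest is None:
--                     return None
--                 continue  # tail call: parse the second operand
--             return rest  # plain operand token
--     return parse(parsed_query[::-1]) == []
-- ===== Notes on version B (the rewrite author's own statement) =====
-- stated objective: alternative
-- what changed: Replaces A's left-to-right stack simulation (which builds concatenated strings on an explicit stack) by a recursive-descent parse of the token list from the right as a single postfix expression tree, succeeding iff exactly one complete tree consumes every token.
import Mathlib
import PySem

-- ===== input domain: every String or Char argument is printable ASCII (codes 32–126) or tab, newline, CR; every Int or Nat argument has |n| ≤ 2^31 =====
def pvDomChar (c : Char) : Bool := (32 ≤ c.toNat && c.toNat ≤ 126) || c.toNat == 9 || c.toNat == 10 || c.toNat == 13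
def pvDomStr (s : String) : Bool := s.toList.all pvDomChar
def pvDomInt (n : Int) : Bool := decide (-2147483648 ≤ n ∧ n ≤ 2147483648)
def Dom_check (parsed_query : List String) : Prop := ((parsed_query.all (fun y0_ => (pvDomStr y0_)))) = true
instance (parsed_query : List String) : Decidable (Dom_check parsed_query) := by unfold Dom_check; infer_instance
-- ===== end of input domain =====

-- B replaces A's stack simulation by a right-to-left recursive-descent parse; same result, no string building.

-- ===== PORT A =====
-- one loop step of A: stack is `some` list (top at head), `none` = A already returned False
def checkStep (st : Option (List String)) (token : String) : Option (List String) :=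
  match st with
  | none => none
  | some stack =>
    if token = "not" then
      match stack with
      | [] => none
      | tos :: rest => some (("not" ++ tos) :: rest)
    else if token = "and" then
      match stack with
      | tos1 :: tos2 :: rest => some ((tos1 ++ "and" ++ tos2) :: rest)
      | _ => none
    else if token = "or" then
      match stack with
      | tos1 :: tos2 :: rest => some ((tos1 ++ "ors" ++ tos2) :: rest)
      | _ => none
    else some (token :: stack)

def check (parsed_query : List String) : Bool :=
  match List.foldl checkStep (some []) parsed_query with
  | some stack => stack.length == 1
  | none => false

-- ===== PORT B =====
-- Source B's `parse`: consume one complete postfix expression from the reversed token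
-- list, return the leftover tokens (`none` = failure). The length bound in the
-- result type only justifies termination of the second recursive call.
def parseB : (ts : List String) → Option {r : List String // r.length < ts.length}
  | [] => none
  | t :: rest =>
    if t = "not" then
      match parseB rest with
      | none => none
      | some ⟨r, h⟩ => some ⟨r, by simp only [List.length_cons]; omega⟩
    else if t = "and" ∨ t = "or" then
      match parseB rest with
      | none => none
      | some ⟨r1, h1⟩ =>
        match parseB r1 with
        | none => none
        | some ⟨r2, h2⟩ => some ⟨r2, by simp only [List.length_cons]; omega⟩
    else some ⟨rest, by simp⟩
termination_by ts => ts.length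
decreasing_by all_goals (simp only [List.length_cons] at *; omega)

def check_alt (parsed_query : List String) : Bool :=
  match parseB parsed_query.reverse with
  | some ⟨r, _⟩ => r.isEmpty
  | none => false

-- ===== PRECONDITION & SPEC =====
def Spec_check (parsed_query : List String) (out : Bool) : Prop := out = check_alt parsed_query
instance (parsed_query : List String) (out : Bool) : Decidable (Spec_check parsed_query out) := by unfold Spec_check; infer_instance

-- ===== CLAIM (what is proved, stated in full; the proofs are below) =====
def Claim_equal_check : Prop := ∀ (parsed_query : List String), Dom_check parsed_query → Spec_check parsed_query (check parsed_query)

-- ===== LEMMAS AND PROOFS =====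

-- length-only abstraction of A's step
def stepL (st : Option Nat) (token : String) : Option Nat :=
  match st with
  | none => none
  | some n =>
    if token = "not" then
      match n with
      | 0 => none
      | m + 1 => some (m + 1)
    else if token = "and" then
      match n with
      | m + 2 => some (m + 1)
      | _ => none
    else if token = "or" then
      match n with
      | m + 2 => some (m + 1)
      | _ => none
    else some (n + 1)

theorem foldl_checkStep_none (q : List String) : List.foldl checkStep none q = none := by
  induction q with
  | nil => rfl
  | cons t q ih => simpa [checkStep] using ih

theorem foldl_stepL_none (q : List String) : List.foldl stepL none q = none := by
  induction q with
  | nil => rfl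
  | cons t q ih => simpa [stepL] using ih

theorem foldl_len (q : List String) : ∀ st : List String,
    (List.foldl checkStep (some st) q).map List.length = List.foldl stepL (some st.length) q := by
  induction q with
  | nil => intro st; rfl
  | cons t q ih =>
    intro st
    by_cases hn : t = "not"
    · cases st with
      | nil => simp [hn, checkStep, stepL, foldl_checkStep_none, foldl_stepL_none]
      | cons s ss => simpa [hn, checkStep, stepL] using ih (("not" ++ s) :: ss)
    · by_cases ha : t = "and"
      · match st with
        | [] => simp [ha, checkStep, stepL, foldl_checkStep_none, foldl_stepL_none]
        | [s] => simp [ha, checkStep, stepL, foldl_checkStep_none, foldl_stepL_none]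
        | s1 :: s2 :: ss => simpa [hn, ha, checkStep, stepL] using ih ((s1 ++ "and" ++ s2) :: ss)
      · by_cases ho : t = "or"
        · match st with
          | [] => simp [ho, checkStep, stepL, foldl_checkStep_none, foldl_stepL_none]
          | [s] => simp [ho, checkStep, stepL, foldl_checkStep_none, foldl_stepL_none]
          | s1 :: s2 :: ss => simpa [hn, ha, ho, checkStep, stepL] using ih ((s1 ++ "ors" ++ s2) :: ss)
        · simpa [hn, ha, ho, checkStep, stepL] using ih (t :: st)

-- number of complete expressions the reversed-order token list ts splits into
def trees : (ts : List String) → Option Nat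
  | ts =>
    match parseB ts with
    | none => if ts.isEmpty then some 0 else none
    | some ⟨r, _⟩ => (trees r).map (· + 1)
termination_by ts => ts.length

theorem trees_eq_zero {r : List String} (h : trees r = some 0) : r = [] := by
  rw [trees] at h
  rcases hp : parseB r with _ | ⟨⟨r1, h1⟩⟩
  · rw [hp] at h
    by_cases he : r.isEmpty
    · exact List.isEmpty_iff.mp he
    · simp [he] at h
  · rw [hp] at h
    simp at h


theorem step_trees (t : String) (rest : List String) :
    stepL (trees rest) t = trees (t :: rest) := by
  rcases hp : parseB rest with _ | ⟨⟨r1, h1⟩⟩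
  · by_cases he : rest = []
    · subst he
      by_cases hn : t = "not"
      · subst hn; simp [trees, parseB, stepL]
      · by_cases ha : t = "and"
        · subst ha; simp [trees, parseB, stepL]
        · by_cases ho : t = "or"
          · subst ho; simp [trees, parseB, stepL]
          · simp [trees, parseB, stepL, hn, ha, ho]
    · have htr : trees rest = none := by rw [trees, hp]; simp [he]
      rw [htr]; conv_rhs => rw [trees]
      by_cases hn : t = "not"
      · subst hn; simp [parseB, hp, stepL]
      · by_cases ha : t = "and"
        · subst ha; simp [parseB, hp, stepL]
        · by_cases ho : t = "or"
          · subst ho; simp [parseB, hp, stepL]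
          · simp [parseB, stepL, hn, ha, ho, htr]
  · have htr : trees rest = (trees r1).map (· + 1) := by rw [trees, hp]
    by_cases hn : t = "not"
    · subst hn
      rcases hr1 : trees r1 with _ | k <;> (conv_rhs => rw [trees]) <;> simp [parseB, hp, stepL, htr, hr1]
    · by_cases hb : t = "and" ∨ t = "or"
      · rcases hq : parseB r1 with _ | ⟨⟨r2, h2⟩⟩
        · by_cases hre : r1 = []
          · have ht1 : trees r1 = some 0 := by rw [trees, hq]; simp [hre]
            rcases hb with hb | hb <;> subst hb <;> (conv_rhs => rw [trees]) <;>
              simp [parseB, hp, hq, stepL, htr, ht1]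
          · have ht1 : trees r1 = none := by rw [trees, hq]; simp [hre]
            rcases hb with hb | hb <;> subst hb <;> (conv_rhs => rw [trees]) <;>
              simp [parseB, hp, hq, stepL, htr, ht1]
        · have ht1 : trees r1 = (trees r2).map (· + 1) := by rw [trees, hq]
          rcases hb with hb | hb <;> subst hb <;>
            rcases hr2 : trees r2 with _ | k <;> (conv_rhs => rw [trees]) <;>
              simp [parseB, hp, hq, stepL, htr, ht1, hr2]
      · simp only [not_or] at hb
        conv_rhs => rw [trees]
        rcases hr : trees rest with _ | k <;>
          simp [parseB, stepL, hn, hb.1, hb.2, hr]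

theorem machine_eq_trees (ts : List String) :
    List.foldl stepL (some 0) ts.reverse = trees ts := by
  induction ts with
  | nil => rw [trees]; simp [parseB]
  | cons t rest ih =>
    rw [List.reverse_cons, List.foldl_append]
    simp only [List.foldl_cons, List.foldl_nil, ih]
    exact step_trees t rest

theorem trees_nil : trees ([] : List String) = some 0 := by
  rw [trees]; simp [parseB]

theorem check_eq (q : List String) : check q = check_alt q := by
  have hm : List.foldl stepL (some 0) q = trees q.reverse := by
    have h := machine_eq_trees q.reverse
    rwa [List.reverse_reverse] at h
  have hml : (List.foldl checkStep (some ([] : List String)) q).map List.length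
      = trees q.reverse := by
    rw [foldl_len q []]; simpa using hm
  unfold check check_alt
  rcases hF : List.foldl checkStep (some ([] : List String)) q with _ | s <;> rw [hF] at hml <;>
    simp only [Option.map_none, Option.map_some] at hml
  · rcases hp : parseB q.reverse with _ | ⟨⟨r, hr⟩⟩
    · simp
    · have ht : trees q.reverse = (trees r).map (· + 1) := by rw [trees, hp]
      cases r with
      | nil => rw [trees_nil] at ht; rw [ht] at hml; simp at hml
      | cons a b => simp
  · rcases hp : parseB q.reverse with _ | ⟨⟨r, hr⟩⟩
    · have ht : trees q.reverse = if q.reverse.isEmpty then some 0 else none := by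
        rw [trees, hp]
      rw [ht] at hml
      by_cases he : q.reverse.isEmpty <;> simp [he] at hml
      simp [hml]
    · have ht : trees q.reverse = (trees r).map (· + 1) := by rw [trees, hp]
      rw [ht] at hml
      rcases htr : trees r with _ | k <;> rw [htr] at hml <;> simp at hml
      cases r with
      | nil =>
        rw [trees_nil] at htr
        simp at htr
        simp
        omega
      | cons a b =>
        have : k ≠ 0 := fun h0 => by
          rw [h0] at htr
          exact (List.cons_ne_nil a b) (trees_eq_zero htr)
        simp
        omega

-- ===== VERDICT (by name: the statement is the Claim_ definition above) =====
theorem check_spec : Claim_equal_check := by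
  intro q _
  unfold Spec_check
  exact check_eq q
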